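-- pv_equiv track=rewrite | github.com/etherbeing/cveforge | core/commands/compression/math/manipulation.py | hole_xor
-- ===== SOURCE A (Python) =====
-- from collections import Counter
--
-- def hole_xor(array: list[int]):
--     counted = Counter(array)
--     res: list[int] = []
--     count = 0
--     for el in sorted(set(array)):
--         count += counted[el]
--         res.append(count ^ el)
--     return res
-- ===== SOURCE B (Python) =====
-- def hole_xor(array: list[int]):
--     # divide & conquer: three-way partition around a middle pivot, emit in order;
--     # each cumulative count is the size of the left partition plus the pivot's multiplicity
--     res: list[int] = []
--
--     def go(xs: list[int], base: int) -> None: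
--         if not xs:
--             return
--         p = xs[len(xs) // 2]
--         less = [x for x in xs if x < p]
--         eq = sum(1 for x in xs if x == p)
--         greater = [x for x in xs if x > p]
--         go(less, base)
--         res.append((base + len(less) + eq) ^ p)
--         go(greater, base + len(less) + eq)
--
--     go(array, 0)
--     return res
-- ===== Notes on version B (the rewrite author's own statement) =====
-- stated objective: alternative
-- what changed: B replaces sort+Counter+cumulative scan by a quicksort-style divide and conquer: three-way partition around a middle pivot, recurse on the strictly-smaller and strictly-larger parts, emitting each value's result in order with its cumulative count read off the partition sizes.
import Mathlib
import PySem

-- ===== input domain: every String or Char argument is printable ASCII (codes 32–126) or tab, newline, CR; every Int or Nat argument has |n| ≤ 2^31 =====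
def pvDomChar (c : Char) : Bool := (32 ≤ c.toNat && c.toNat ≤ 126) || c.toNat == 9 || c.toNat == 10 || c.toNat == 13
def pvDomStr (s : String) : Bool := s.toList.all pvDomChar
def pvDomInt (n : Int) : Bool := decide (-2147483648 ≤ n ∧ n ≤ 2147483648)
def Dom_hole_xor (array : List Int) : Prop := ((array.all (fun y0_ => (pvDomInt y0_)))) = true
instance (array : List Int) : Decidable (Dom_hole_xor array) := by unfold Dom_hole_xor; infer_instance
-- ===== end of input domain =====

-- B replaces A's sort + Counter + cumulative scan by a quicksort-style divide and
-- conquer: three-way partition around a middle pivot, counts read off partition sizes.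
-- ===== PORT A =====
def hole_xor (array : List Int) : List Int :=
  let counted := PySem.Dict.counter array
  ((PySem.List.sorted (PySem.Set.ofList array) (fun x => x) false).foldl
    (fun (st : Int × List Int) el =>
      let count := st.1 + counted.getD el 0
      (count, st.2 ++ [PySem.Int.bxor count el])) ((0 : Int), ([] : List Int))).2

-- ===== PORT B =====
-- the pivot xs[len(xs)//2] of a nonempty xs is an element of xs (used for termination)
theorem pvPivot_mem (x : Int) (t : List Int) :
    (PySem.List.pyGet? (x :: t) (PySem.Int.floordiv ((x :: t).length : Int) 2)).getD 0 ∈ x :: t := by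
  have h2 : PySem.Int.floordiv (((x :: t).length : Nat) : Int) 2 = (((x :: t).length / 2 : Nat) : Int) := by
    rw [PySem.Int.floordiv, Int.fdiv_eq_ediv_of_nonneg _ (by positivity)]
    omega
  have hlt : (x :: t).length / 2 < (x :: t).length := by simp; omega
  rw [h2, PySem.List.pyGet?_natCast, List.getElem?_eq_getElem hlt, Option.getD_some]
  exact List.getElem_mem hlt

theorem pvFilter_lt (p : Int) (xs : List Int) (q : Int → Bool) (hp : p ∈ xs) (hq : q p = false) :
    (xs.filter q).length < xs.length := by
  apply List.length_filter_lt_length_iff_exists.mpr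
  exact ⟨p, hp, by simp [hq]⟩

-- recursive helper go(xs, base) of Source B (results returned instead of appended to the closure list)
def pvGoB : List Int → Int → List Int
  | [], _ => []
  | x :: t, base =>
    let p := (PySem.List.pyGet? (x :: t) (PySem.Int.floordiv (((x :: t).length : Nat) : Int) 2)).getD 0
    let less := (x :: t).filter (fun y => decide (y < p))
    let eq := ((x :: t).filter (fun y => decide (y = p))).length
    let greater := (x :: t).filter (fun y => decide (p < y))
    pvGoB less base
      ++ PySem.Int.bxor (base + (less.length : Int) + (eq : Int)) p
        :: pvGoB greater (base + (less.length : Int) + (eq : Int))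
termination_by xs _ => xs.length
decreasing_by
  · exact pvFilter_lt _ _ _ (pvPivot_mem x t) (by simp)
  · exact pvFilter_lt _ _ _ (pvPivot_mem x t) (by simp)

def hole_xor_alt (array : List Int) : List Int := pvGoB array 0

-- ===== PRECONDITION & SPEC =====
def Spec_hole_xor (array : List Int) (out : List Int) : Prop := out = hole_xor_alt array
instance (array : List Int) (out : List Int) : Decidable (Spec_hole_xor array out) := by unfold Spec_hole_xor; infer_instance

-- ===== CLAIM (what is proved, stated in full; the proofs are below) =====
def Claim_equal_hole_xor : Prop := ∀ (array : List Int), Dom_hole_xor array → Spec_hole_xor array (hole_xor array)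

-- ===== LEMMAS AND PROOFS =====

-- reference form of A's loop: counts supplied by f, running total cnt
def pvGo (f : Int → Int) (cnt : Int) : List Int → List Int
  | [] => []
  | e :: u => PySem.Int.bxor (cnt + f e) e :: pvGo f (cnt + f e) u

theorem pvFoldlA (f : Int → Int) (u : List Int) (cnt : Int) (acc : List Int) :
    (u.foldl (fun (st : Int × List Int) el =>
        (st.1 + f el, st.2 ++ [PySem.Int.bxor (st.1 + f el) el])) (cnt, acc)).2
      = acc ++ pvGo f cnt u := by
  induction u generalizing cnt acc with
  | nil => simp [pvGo]
  | cons e u ih => simp [pvGo, ih]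

-- length of a filter splits along a disjoint cover of its predicate
theorem pvLenSplit (l : List Int) (pb qb rb : Int → Bool)
    (h : ∀ x ∈ l, (rb x = true ↔ (pb x = true ∨ qb x = true)) ∧ ¬(pb x = true ∧ qb x = true)) :
    (l.filter rb).length = (l.filter pb).length + (l.filter qb).length := by
  induction l with
  | nil => simp
  | cons a l ih =>
    have ha := h a (by simp)
    have ih' := ih (fun x hx => h x (by simp [hx]))
    by_cases hp : pb a = true
    · have hr : rb a = true := ha.1.mpr (Or.inl hp)
      have hq : qb a = false := by
        rcases Bool.eq_false_or_eq_true (qb a) with h' | h'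
        · exact absurd ⟨hp, h'⟩ ha.2
        · exact h'
      simp [hp, hq, hr, ih']; omega
    · have hp' : pb a = false := by simpa using hp
      by_cases hq : qb a = true
      · have hr : rb a = true := ha.1.mpr (Or.inr hq)
        simp [hp', hq, hr, ih']
        omega
      · have hq' : qb a = false := by simpa using hq
        have hr : rb a = false := by
          rcases Bool.eq_false_or_eq_true (rb a) with h' | h'
          · rcases ha.1.mp h' with h'' | h'' <;> simp_all
          · exact h'
        simp [hp', hq', hr, ih']

theorem pvCountFilter (l : List Int) (v : Int) :
    l.count v = (l.filter (fun x => decide (x = v))).length := by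
  rw [List.count_eq_countP, List.countP_eq_length_filter]
  congr 1

theorem pvPairwiseLt (l : List Int) (h1 : l.Pairwise (· ≤ ·)) (h2 : l.Nodup) :
    l.Pairwise (· < ·) :=
  (h1.and h2).imp fun h => lt_of_le_of_ne h.1 h.2

theorem pvSortedSetNodup (xs : List Int) :
    (PySem.List.sorted (PySem.Set.ofList xs) (fun x => x) false).Nodup :=
  (PySem.List.sorted_perm (PySem.Set.ofList xs) (fun x => x) false).nodup_iff.mpr
    (PySem.Set.nodup_ofList xs)

theorem pvSortedSetLt (xs : List Int) :
    (PySem.List.sorted (PySem.Set.ofList xs) (fun x => x) false).Pairwise (· < ·) :=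
  pvPairwiseLt _ (PySem.List.sorted_pairwise (PySem.Set.ofList xs) (fun x => x)) (pvSortedSetNodup xs)

theorem pvMemSortedSet (xs : List Int) (a : Int) :
    a ∈ PySem.List.sorted (PySem.Set.ofList xs) (fun x => x) false ↔ a ∈ xs := by
  rw [PySem.List.mem_sorted, PySem.Set.mem_ofList]

-- A's loop over a tail u of the sorted distinct values, with c elements already counted,
-- produces for each v the absolute count of elements ≤ v
theorem pvGoA_eq (array : List Int) : ∀ (u : List Int) (c : Nat),
    u.Pairwise (· < ·) →
    (∀ x ∈ array, x ∉ u → ∀ v ∈ u, x < v) →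
    c = (array.filter (fun x => decide (x ∉ u))).length →
    pvGo (fun e => (array.count e : Int)) (c : Int) u
      = u.map (fun v => PySem.Int.bxor ((array.filter (fun x => decide (x ≤ v))).length : Int) v) := by
  intro u
  induction u with
  | nil => intro c _ _ _; simp [pvGo]
  | cons v u' ih =>
    intro c hpw hlow hc
    rcases List.pairwise_cons.mp hpw with ⟨hv, hpw'⟩
    have key : (array.filter (fun x => decide (x ≤ v))).length
        = (array.filter (fun x => decide (x ∉ v :: u'))).length
          + (array.filter (fun x => decide (x = v))).length := by
      apply pvLenSplit
      intro x hx
      constructor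
      · simp only [decide_eq_true_eq]
        constructor
        · intro hxe
          by_cases hxv : x = v
          · exact Or.inr hxv
          · left
            intro hmem
            rcases List.mem_cons.mp hmem with rfl | hmem
            · exact hxv rfl
            · exact absurd (hv x hmem) (not_lt.mpr hxe)
        · rintro (hnm | rfl)
          · exact le_of_lt (hlow x hx hnm v (by simp))
          · exact le_refl x
      · simp only [decide_eq_true_eq]
        rintro ⟨hnm, rfl⟩
        exact hnm (by simp)
    have cstep : (array.filter (fun x => decide (x ∉ u'))).length
        = (array.filter (fun x => decide (x ∉ v :: u'))).length
          + (array.filter (fun x => decide (x = v))).length := by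
      apply pvLenSplit
      intro x hx
      constructor
      · simp only [decide_eq_true_eq]
        constructor
        · intro hnm
          by_cases hxv : x = v
          · exact Or.inr hxv
          · exact Or.inl (by simp [hxv, hnm])
        · rintro (hnm | rfl)
          · intro hmem; exact hnm (by simp [hmem])
          · intro hmem; exact absurd (hv x hmem) (lt_irrefl x)
      · simp only [decide_eq_true_eq]
        rintro ⟨hnm, rfl⟩
        exact hnm (by simp)
    have harg : (c : Int) + (array.count v : Int)
        = ((array.filter (fun x => decide (x ≤ v))).length : Int) := by
      rw [key, hc, pvCountFilter]; push_cast; ring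
    have hlow' : ∀ x ∈ array, x ∉ u' → ∀ w ∈ u', x < w := by
      intro x hx hnm w hw
      by_cases hxv : x = v
      · subst hxv; exact hv w hw
      · exact hlow x hx (by simp [hxv, hnm]) w (by simp [hw])
    have hc' : ((c : Int) + (array.count v : Int))
        = (((array.filter (fun x => decide (x ∉ u'))).length : Nat) : Int) := by
      rw [cstep, hc, pvCountFilter]; push_cast; ring
    rw [pvGo, List.map_cons]
    congr 1
    · rw [harg]
    · rw [hc']
      exact ih _ hpw' hlow' rfl

-- the sorted distinct values of xs split around any element p of xs
theorem pvSortedSplit (xs : List Int) (p : Int) (hp : p ∈ xs) :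
    PySem.List.sorted (PySem.Set.ofList xs) (fun x => x) false
      = PySem.List.sorted (PySem.Set.ofList (xs.filter (fun y => decide (y < p)))) (fun x => x) false
        ++ p :: PySem.List.sorted (PySem.Set.ofList (xs.filter (fun y => decide (p < y)))) (fun x => x) false := by
  set SL := PySem.List.sorted (PySem.Set.ofList (xs.filter (fun y => decide (y < p)))) (fun x => x) false with hSL
  set SG := PySem.List.sorted (PySem.Set.ofList (xs.filter (fun y => decide (p < y)))) (fun x => x) false with hSG
  have memL : ∀ a, a ∈ SL ↔ a ∈ xs ∧ a < p := by
    intro a; rw [hSL, pvMemSortedSet, List.mem_filter]; simp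
  have memG : ∀ a, a ∈ SG ↔ a ∈ xs ∧ p < a := by
    intro a; rw [hSG, pvMemSortedSet, List.mem_filter]; simp
  have hpw : (SL ++ p :: SG).Pairwise (· < ·) := by
    rw [List.pairwise_append]
    refine ⟨pvSortedSetLt _, ?_, ?_⟩
    · rw [List.pairwise_cons]
      exact ⟨fun b hb => ((memG b).mp hb).2, pvSortedSetLt _⟩
    · intro a ha b hb
      have hap : a < p := ((memL a).mp ha).2
      rcases List.mem_cons.mp hb with rfl | hb
      · exact hap
      · exact lt_trans hap ((memG b).mp hb).2
  have hperm : (SL ++ p :: SG).Perm (PySem.Set.ofList xs) := by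
    apply (List.perm_ext_iff_of_nodup (hpw.imp ne_of_lt) (PySem.Set.nodup_ofList xs)).mpr
    intro a
    rw [PySem.Set.mem_ofList, List.mem_append, List.mem_cons, memL, memG]
    constructor
    · rintro (⟨h, _⟩ | rfl | ⟨h, _⟩) <;> first | exact h | exact hp
    · intro h
      rcases lt_trichotomy a p with h' | rfl | h'
      · exact Or.inl ⟨h, h'⟩
      · exact Or.inr (Or.inl rfl)
      · exact Or.inr (Or.inr ⟨h, h'⟩)
  apply PySem.List.sorted_eq_of_perm_of_pairwise_lt
  · exact hperm
  · exact hpw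

-- B's recursion computes, for each distinct value v of xs in order, base + #{x in xs | x <= v}
theorem pvGoB_eq_aux (n : Nat) : ∀ (xs : List Int), xs.length ≤ n → ∀ (base : Int),
    pvGoB xs base
      = (PySem.List.sorted (PySem.Set.ofList xs) (fun x => x) false).map
          (fun v => PySem.Int.bxor (base + ((xs.filter (fun x => decide (x ≤ v))).length : Int)) v) := by
  induction n with
  | zero =>
    intro xs hlen base
    have : xs = [] := List.length_eq_zero_iff.mp (Nat.le_zero.mp hlen)
    subst this
    simp [pvGoB, PySem.Set.ofList, PySem.List.sorted]
  | succ n ih =>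
    intro xs hlen base
    match xs with
    | [] => simp [pvGoB, PySem.Set.ofList, PySem.List.sorted]
    | x :: t =>
      rw [pvGoB]
      set p := (PySem.List.pyGet? (x :: t) (PySem.Int.floordiv (((x :: t).length : Nat) : Int) 2)).getD 0 with hpdef
      set less := (x :: t).filter (fun y => decide (y < p)) with hlessdef
      set eq := ((x :: t).filter (fun y => decide (y = p))).length with heqdef
      set greater := (x :: t).filter (fun y => decide (p < y)) with hgdef
      have hp : p ∈ x :: t := pvPivot_mem x t
      have hlessle : less.length ≤ n := by
        have := pvFilter_lt p (x :: t) (fun y => decide (y < p)) hp (by simp)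
        rw [← hlessdef] at this
        have hxt : (x :: t).length = t.length + 1 := rfl
        rw [hxt] at this hlen
        omega
      have hgle : greater.length ≤ n := by
        have := pvFilter_lt p (x :: t) (fun y => decide (p < y)) hp (by simp)
        rw [← hgdef] at this
        have hxt : (x :: t).length = t.length + 1 := rfl
        rw [hxt] at this hlen
        omega
      have hle_p : ((x :: t).filter (fun y => decide (y ≤ p))).length = less.length + eq := by
        rw [hlessdef, heqdef]
        apply pvLenSplit
        intro y _
        simp only [decide_eq_true_eq]
        constructor
        · constructor
          · intro h
            rcases lt_or_eq_of_le h with h' | h'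
            · exact Or.inl h'
            · exact Or.inr h'
          · rintro (h | rfl)
            · exact le_of_lt h
            · exact le_refl _
        · rintro ⟨h1, rfl⟩; exact absurd h1 (lt_irrefl _)
      rw [pvSortedSplit (x :: t) p hp, ← hlessdef, ← hgdef, List.map_append, List.map_cons]
      congr 1
      · rw [ih less hlessle base]
        apply List.map_congr_left
        intro v hv
        have hvp : v < p := by
          rw [pvMemSortedSet, hlessdef, List.mem_filter] at hv
          simpa using hv.2
        have hfeq : (x :: t).filter (fun y => decide (y ≤ v)) = less.filter (fun y => decide (y ≤ v)) := by
          rw [hlessdef, List.filter_filter]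
          apply List.filter_congr
          intro y _
          by_cases h : y ≤ v
          · have h2 : y < p := lt_of_le_of_lt h hvp
            simp [h, h2]
          · simp [h]
        rw [hfeq]
      · congr 1
        · congr 1
          rw [hle_p]
          push_cast
          ring
        · rw [ih greater hgle (base + (less.length : Int) + (eq : Int))]
          apply List.map_congr_left
          intro v hv
          have hvp : p < v := by
            rw [pvMemSortedSet, hgdef, List.mem_filter] at hv
            simpa using hv.2
          have hsplit : ((x :: t).filter (fun y => decide (y ≤ v))).length
              = ((x :: t).filter (fun y => decide (y ≤ p))).length
                + ((x :: t).filter (fun y => decide (y ≤ v) && decide (p < y))).length := by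
            apply pvLenSplit
            intro y _
            simp only [Bool.and_eq_true, decide_eq_true_eq]
            constructor
            · constructor
              · intro h
                by_cases h' : y ≤ p
                · exact Or.inl h'
                · exact Or.inr ⟨h, not_le.mp h'⟩
              · rintro (h | ⟨h1, h2⟩)
                · exact le_trans h (le_of_lt hvp)
                · exact h1
            · rintro ⟨h1, _, h2⟩; exact absurd h2 (not_lt.mpr h1)
          have hGfilter : greater.filter (fun y => decide (y ≤ v))
              = (x :: t).filter (fun y => decide (y ≤ v) && decide (p < y)) := by
            rw [hgdef, List.filter_filter]
          congr 1
          rw [hGfilter, hsplit, hle_p]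
          push_cast
          ring

theorem pvGoB_eq (xs : List Int) (base : Int) :
    pvGoB xs base
      = (PySem.List.sorted (PySem.Set.ofList xs) (fun x => x) false).map
          (fun v => PySem.Int.bxor (base + ((xs.filter (fun x => decide (x ≤ v))).length : Int)) v) :=
  pvGoB_eq_aux xs.length xs (le_refl _) base

-- ===== VERDICT (by name: the statement is the Claim_ definition above) =====
theorem hole_xor_spec : Claim_equal_hole_xor := by
  intro array _
  unfold Spec_hole_xor hole_xor hole_xor_alt
  rw [pvFoldlA (fun el => (PySem.Dict.counter array).getD el 0), List.nil_append]
  have hcf : (fun el => (PySem.Dict.counter array).getD el 0)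
      = (fun el => ((array.count el : Nat) : Int)) := by
    funext el; exact PySem.Dict.getD_counter array el
  rw [hcf, pvGoB_eq array 0]
  have h0 : ((0 : Nat) : Int) = (0 : Int) := rfl
  rw [← h0]
  rw [pvGoA_eq array _ 0 (pvSortedSetLt array)
    (fun x hx hnm v _ => absurd ((pvMemSortedSet array x).mpr hx) hnm)
    (by
      symm
      rw [List.length_eq_zero_iff, List.filter_eq_nil_iff]
      intro x hx
      simp [(pvMemSortedSet array x).mpr hx])]
  apply List.map_congr_left
  intro v _
  congr 1
  push_cast; ring
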